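-- pv_equiv track=rewrite | github.com/aurtg/open-david | tools/util.py | isConst
-- ===== SOURCE A (Python) =====
-- def isConst(elem):
--     if elem[0] == '_':
--         return isConst(elem[1:])
--     if elem[0] == '"' or elem[0] == "'":
--         return True
--     if not elem[0].islower():
--         return True
--     return False
-- ===== SOURCE B (Python) =====
-- def isConst(elem):
--     return not elem.lstrip('_')[0].islower()
-- ===== Notes on version B (the rewrite author's own statement) =====
-- stated objective: simpler
-- what changed: Replaces the self-recursion that peels one leading underscore per call (rebuilding a string slice each time) with a single lstrip('_') and one flat test of the first remaining character; the quote branches collapse into 'not islower' since quotes are not lowercase.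
import Mathlib
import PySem

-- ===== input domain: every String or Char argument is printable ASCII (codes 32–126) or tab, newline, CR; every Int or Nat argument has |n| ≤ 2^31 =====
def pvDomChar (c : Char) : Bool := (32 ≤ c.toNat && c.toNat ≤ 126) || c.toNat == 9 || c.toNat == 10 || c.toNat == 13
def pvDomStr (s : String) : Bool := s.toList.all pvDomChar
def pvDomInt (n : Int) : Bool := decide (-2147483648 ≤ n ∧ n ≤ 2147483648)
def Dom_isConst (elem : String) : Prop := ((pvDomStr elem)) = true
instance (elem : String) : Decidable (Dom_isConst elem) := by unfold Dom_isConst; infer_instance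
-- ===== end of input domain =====

-- B replaces A's one-underscore-per-call self-recursion with a single lstrip('_') plus one
-- flat 'not islower' test of the first remaining character (simpler; same behaviour).


-- ===== PORT A =====
-- A recurses on elem[1:] while elem[0] = '_'; ported as structural recursion on the char list.
-- On [] Python raises IndexError (excluded by Pre_); the port returns false there.
def isConstAuxA : List Char → Bool
  | [] => false
  | c :: rest =>
    if c = '_' then isConstAuxA rest
    else if c = '"' ∨ c = '\'' then true
    else if !(PySem.Chars.islower c) then true
    else false

def isConst (elem : String) : Bool := isConstAuxA elem.toList

-- ===== PORT B =====
-- lstrip('_') on the ASCII domain is exactly dropWhile (· = '_'); [0] is pyGet? 0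
-- (none = IndexError, excluded by Pre_; the port returns false there).
def isConst_alt (elem : String) : Bool :=
  match PySem.List.pyGet? (elem.toList.dropWhile (fun c => c = '_')) 0 with
  | some c => !(PySem.Chars.islower c)
  | none => false

-- ===== PRECONDITION & SPEC =====
-- Pre_ excludes exactly the inputs where the Pythons raise IndexError: the empty string
-- and strings consisting only of underscores (both A and B raise there).
def Pre_isConst (elem : String) : Prop := elem.toList.any (fun c => c ≠ '_') = true
instance (elem : String) : Decidable (Pre_isConst elem) := by unfold Pre_isConst; infer_instance
def pvWitness_isConst : String := "__x"

def Spec_isConst (elem : String) (out : Bool) : Prop := out = isConst_alt elem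
instance (elem : String) (out : Bool) : Decidable (Spec_isConst elem out) := by unfold Spec_isConst; infer_instance

-- ===== CLAIM (what is proved, stated in full; the proofs are below) =====
def Claim_equal_isConst : Prop := ∀ (elem : String), Dom_isConst elem → Pre_isConst elem → Spec_isConst elem (isConst elem)

-- ===== LEMMAS AND PROOFS =====
lemma isConstAuxA_eq (l : List Char) (h : ∃ c ∈ l, c ≠ '_') :
    isConstAuxA l =
      match PySem.List.pyGet? (l.dropWhile (fun c => c = '_')) 0 with
      | some c => !(PySem.Chars.islower c)
      | none => false := by
  induction l with
  | nil => simp at h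
  | cons c rest ih =>
    by_cases hc : c = '_'
    · subst hc
      have h' : ∃ c ∈ rest, c ≠ '_' := by
        rcases h with ⟨d, hd, hne⟩
        rcases List.mem_cons.mp hd with rfl | hd'
        · exact absurd rfl hne
        · exact ⟨d, hd', hne⟩
      simpa [isConstAuxA] using ih h'
    · simp only [isConstAuxA, List.dropWhile_cons, decide_eq_true_eq, hc, if_false]
      by_cases hq : c = '"' ∨ c = '\''
      · have : PySem.Chars.islower c = false := by
          rcases hq with rfl | rfl <;> decide
        simp [hq, this, PySem.List.pyGet?, PySem.List.pyIdx?]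
      · simp [hq, PySem.List.pyGet?, PySem.List.pyIdx?]

-- ===== VERDICT (by name: the statement is the Claim_ definition above) =====
theorem isConst_spec : Claim_equal_isConst := by
  intro elem _ hpre
  unfold Spec_isConst isConst isConst_alt
  exact isConstAuxA_eq elem.toList (by simpa using List.any_eq_true.mp hpre)
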